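-- pv_equiv track=rewrite | github.com/h0353914/SemcCameraUI | tools_Common/compare_java_smali.py | _remove_empty_clinit
-- ===== SOURCE A (Python) =====
-- def _remove_empty_clinit(lines: list[str]) -> list[str]:
--     """移除空的 <clinit> 方法（仅含 return-void）"""
--     out = []
--     i = 0
--     while i < len(lines):
--         if lines[i].startswith(".method") and "<clinit>" in lines[i]:
--             # 收集整个方法
--             method_block = [lines[i]]
--             i += 1
--             while i < len(lines) and not lines[i].startswith(".end method"):
--                 method_block.append(lines[i])
--                 i += 1
--             if i < len(lines):
--                 method_block.append(lines[i])
--                 i += 1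
--             # 检查是否为空（只有 return-void）
--             body = [l for l in method_block[1:-1] if l.strip()]
--             if body == ["return-void"] or not body:
--                 continue  # 跳过空 <clinit>
--             out.extend(method_block)
--         else:
--             out.append(lines[i])
--             i += 1
--     return out
-- ===== SOURCE B (Python) =====
-- def _remove_empty_clinit(lines: list[str]) -> list[str]:
--     """移除空的 <clinit> 方法（仅含 return-void）— group -> filter -> flatten pipeline"""
--     # pass 1: group lines into segments (clinit method blocks, or single passthrough lines)
--     segs = []
--     i = 0
--     n = len(lines)
--     while i < n:
--         l = lines[i]
--         if l.startswith(".method") and "<clinit>" in l: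
--             j = i + 1
--             while j < n and not lines[j].startswith(".end method"):
--                 j += 1
--             if j < n:
--                 j += 1
--             segs.append(lines[i:j])
--             i = j
--         else:
--             segs.append([l])
--             i += 1
--
--     # pass 2: keep a segment unless it is an empty <clinit> block
--     def keep(seg):
--         h = seg[0]
--         if not (h.startswith(".method") and "<clinit>" in h):
--             return True
--         body = [x for x in seg[1:-1] if x.strip()]
--         return not (body == ["return-void"] or not body)
--
--     # pass 3: flatten
--     return [line for seg in segs if keep(seg) for line in seg]
-- ===== Notes on version B (the rewrite author's own statement) =====
-- stated objective: alternative
-- what changed: A's fused emit-and-collect while-loop is replaced by a three-stage pipeline: group lines into segments (clinit blocks vs single lines), filter out empty clinit blocks, then flatten the kept segments.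
import Mathlib
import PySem

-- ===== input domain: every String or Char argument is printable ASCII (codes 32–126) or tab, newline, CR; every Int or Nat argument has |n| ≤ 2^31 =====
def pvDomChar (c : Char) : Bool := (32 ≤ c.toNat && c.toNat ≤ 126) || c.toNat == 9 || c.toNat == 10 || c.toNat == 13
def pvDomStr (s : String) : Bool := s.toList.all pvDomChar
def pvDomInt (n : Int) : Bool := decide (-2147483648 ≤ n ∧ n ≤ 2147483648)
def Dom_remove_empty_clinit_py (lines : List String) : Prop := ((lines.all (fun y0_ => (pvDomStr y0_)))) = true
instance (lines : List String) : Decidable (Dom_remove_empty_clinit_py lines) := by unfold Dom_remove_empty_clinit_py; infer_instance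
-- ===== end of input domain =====

-- B replaces A's fused emit-and-collect loop by a group → filter → flatten pipeline (objective: alternative decomposition).

-- shared tests, written identically in both Pythons
def pvIsClinit (l : String) : Bool :=
  PySem.Str.startswith l ".method" && PySem.Str.isIn "<clinit>" l

def pvNotEnd (l : String) : Bool := !PySem.Str.startswith l ".end method"

-- body = [x for x in block[1:-1] if x.strip()]; empty iff body == ["return-void"] or not body
def pvIsEmptyBlock (block : List String) : Bool :=
  let body := (PySem.List.slice block (some 1) (some (-1))).filter
      (fun x => PySem.Str.strip x != "")
  body == ["return-void"] || body == []

-- ===== PORT A =====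
def remove_empty_clinit_py (lines : List String) : List String :=
  match lines with
  | [] => []
  | l :: rest =>
    if pvIsClinit l then
      -- inner while collects the method block up to (and incl.) '.end method'
      let pre := rest.takeWhile pvNotEnd
      let after := rest.dropWhile pvNotEnd
      let method_block := l :: (pre ++ after.take 1)
      if pvIsEmptyBlock method_block then
        remove_empty_clinit_py (after.drop 1)          -- continue: skip empty <clinit>
      else
        method_block ++ remove_empty_clinit_py (after.drop 1)
    else
      l :: remove_empty_clinit_py rest
termination_by lines.length
decreasing_by
  · have h1 := List.length_dropWhile_le pvNotEnd rest
    simp at *; omega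
  · have h1 := List.length_dropWhile_le pvNotEnd rest
    simp at *; omega
  · simp

-- ===== PORT B =====
-- pass 1: group lines into segments
def pvSegments (lines : List String) : List (List String) :=
  match lines with
  | [] => []
  | l :: rest =>
    if pvIsClinit l then
      let pre := rest.takeWhile pvNotEnd
      let after := rest.dropWhile pvNotEnd
      (l :: (pre ++ after.take 1)) :: pvSegments (after.drop 1)
    else
      [l] :: pvSegments rest
termination_by lines.length
decreasing_by
  · have h1 := List.length_dropWhile_le pvNotEnd rest
    simp at *; omega
  · simp

-- pass 2: keep a segment unless it is an empty clinit block
def pvKeep (seg : List String) : Bool :=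
  match seg with
  | [] => true
  | h :: _ => !(pvIsClinit h && pvIsEmptyBlock seg)

def remove_empty_clinit_py_alt (lines : List String) : List String :=
  ((pvSegments lines).filter pvKeep).flatMap id

-- ===== PRECONDITION & SPEC =====
def Spec_remove_empty_clinit_py (lines : List String) (out : List String) : Prop := out = remove_empty_clinit_py_alt lines
instance (lines : List String) (out : List String) : Decidable (Spec_remove_empty_clinit_py lines out) := by unfold Spec_remove_empty_clinit_py; infer_instance

-- ===== CLAIM (what is proved, stated in full; the proofs are below) =====
def Claim_equal_remove_empty_clinit_py : Prop := ∀ (lines : List String), Dom_remove_empty_clinit_py lines → Spec_remove_empty_clinit_py lines (remove_empty_clinit_py lines)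

-- ===== LEMMAS AND PROOFS =====
lemma remove_empty_clinit_main (lines : List String) :
    remove_empty_clinit_py lines = ((pvSegments lines).filter pvKeep).flatMap id := by
  fun_induction remove_empty_clinit_py lines with
  | case1 => simp [pvSegments]
  | case2 l rest hcl pre after method_block hemp ih =>
    rw [pvSegments]
    simp only [hcl, if_pos]
    have hk : pvKeep (l :: (rest.takeWhile pvNotEnd ++ (rest.dropWhile pvNotEnd).take 1)) = false := by
      simp [pvKeep, hcl]
      exact hemp
    simp only [List.drop_one] at ih
    simp [List.filter, hk, ih, after]
  | case3 l rest hcl pre after method_block hemp ih =>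
    rw [pvSegments]
    simp only [hcl, if_pos]
    have hk : pvKeep (l :: (rest.takeWhile pvNotEnd ++ (rest.dropWhile pvNotEnd).take 1)) = true := by
      simp [pvKeep, hcl]
      simpa using hemp
    simp only [List.drop_one] at ih
    simp [List.filter, hk, ih, method_block, pre, after]
  | case4 l rest hcl ih =>
    rw [pvSegments]
    simp only [hcl, if_neg, Bool.false_eq_true, not_false_iff]
    have hk : pvKeep [l] = true := by simp [pvKeep, hcl]
    simp [List.filter, hk, ih]

-- ===== VERDICT (by name: the statement is the Claim_ definition above) =====
theorem remove_empty_clinit_py_spec : Claim_equal_remove_empty_clinit_py := by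
  intro lines _
  unfold Spec_remove_empty_clinit_py remove_empty_clinit_py_alt
  exact remove_empty_clinit_main lines
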